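-- pv_equiv track=rewrite | github.com/gniemann/CALL_listing_generator | CALL/pdf_parser.py | remove_unwanted_char
-- ===== SOURCE A (Python) =====
-- def remove_unwanted_char(text, unwanted='()"', puncuation='!?;:'):
--     """
--     Removes unwanted characters and puncuation
--     :param text: Text to process
--     :param unwanted: Characters to remove
--     :param puncuation: Characters to turn into periods (.)
--     :return: A string with unwanted characters removed and puncuation turned into .
--     """
--     new_text = text.lower().replace('\n', ' ')
--     new_text = new_text.replace('- ', ' ')
--
--     for ch in unwanted:
--         new_text = new_text.replace(ch, ' ')
--     for ch in puncuation:
--         new_text = new_text.replace(ch, '.')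
--
--     return new_text
-- ===== SOURCE B (Python) =====
-- def remove_unwanted_char(text, unwanted='()"', puncuation='!?;:'):
--     """Clean text in a single character-at-a-time pass: drop unwanted
--     characters (as spaces), then turn punctuation into periods."""
--     new_text = text.lower().replace('\n', ' ').replace('- ', ' ')
--
--     def clean(c):
--         if c in unwanted:
--             c = ' '
--         return '.' if c in puncuation else c
--
--     return ''.join(map(clean, new_text))
-- ===== Notes on version B (the rewrite author's own statement) =====
-- stated objective: faster
-- what changed: The two per-character replace loops (each a full rescan of the whole text) are replaced by a single character-at-a-time pass that applies both substitution stages per character.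
import Mathlib
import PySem

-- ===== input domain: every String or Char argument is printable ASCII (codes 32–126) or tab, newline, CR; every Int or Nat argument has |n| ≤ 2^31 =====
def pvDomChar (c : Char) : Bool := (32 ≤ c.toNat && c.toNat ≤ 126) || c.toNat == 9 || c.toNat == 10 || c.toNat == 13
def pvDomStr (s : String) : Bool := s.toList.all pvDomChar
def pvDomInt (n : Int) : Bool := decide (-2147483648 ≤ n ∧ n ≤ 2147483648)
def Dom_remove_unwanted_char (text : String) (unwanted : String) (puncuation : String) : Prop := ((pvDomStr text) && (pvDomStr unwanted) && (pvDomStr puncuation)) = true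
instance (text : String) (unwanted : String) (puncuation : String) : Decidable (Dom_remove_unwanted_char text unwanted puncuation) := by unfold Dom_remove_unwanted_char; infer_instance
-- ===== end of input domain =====

-- B replaces A's two repeated-scan replace loops (one full rescan of the text per character of
-- unwanted/puncuation) by a single character-at-a-time pass (objective: faster, one scan of the text).

-- ===== PORT A =====
def remove_unwanted_char (text : String) (unwanted : String) (puncuation : String) : String :=
  let new_text := PySem.Str.replace (PySem.Str.lower text) "\n" " "
  let new_text := PySem.Str.replace new_text "- " " "
  let new_text := unwanted.toList.foldl
    (fun s ch => PySem.Str.replace s (String.ofList [ch]) " ") new_text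
  let new_text := puncuation.toList.foldl
    (fun s ch => PySem.Str.replace s (String.ofList [ch]) ".") new_text
  new_text

-- ===== PORT B =====
-- clean(c): if c in unwanted: c = ' ';  return '.' if c in puncuation else c
def pvClean (unwanted : String) (puncuation : String) (c : Char) : Char :=
  let c := if PySem.Str.isIn (String.ofList [c]) unwanted then ' ' else c
  if PySem.Str.isIn (String.ofList [c]) puncuation then '.' else c

def remove_unwanted_char_alt (text : String) (unwanted : String) (puncuation : String) : String :=
  let new_text := PySem.Str.replace (PySem.Str.replace (PySem.Str.lower text) "\n" " ") "- " " "
  -- ''.join(map(clean, new_text))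
  String.ofList (new_text.toList.map (pvClean unwanted puncuation))

-- ===== PRECONDITION & SPEC =====
def Spec_remove_unwanted_char (text : String) (unwanted : String) (puncuation : String) (out : String) : Prop := out = remove_unwanted_char_alt text unwanted puncuation
instance (text : String) (unwanted : String) (puncuation : String) (out : String) : Decidable (Spec_remove_unwanted_char text unwanted puncuation out) := by unfold Spec_remove_unwanted_char; infer_instance

-- ===== CLAIM (what is proved, stated in full; the proofs are below) =====
def Claim_equal_remove_unwanted_char : Prop := ∀ (text : String) (unwanted : String) (puncuation : String), Dom_remove_unwanted_char text unwanted puncuation → Spec_remove_unwanted_char text unwanted puncuation (remove_unwanted_char text unwanted puncuation)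

-- ===== LEMMAS AND PROOFS =====

-- single-char replace on char lists is a pointwise map
theorem replace_go_single (c r : Char) :
    ∀ (fuel : Nat) (l acc : List Char), l.length ≤ fuel →
      PySem.Chars.replace.go [c] [r] fuel l acc
        = acc.reverse ++ l.map (fun x => if x = c then r else x) := by
  intro fuel
  induction fuel with
  | zero =>
    intro l acc h
    have : l = [] := List.length_eq_zero_iff.mp (Nat.le_zero.mp h)
    subst this
    simp [PySem.Chars.replace.go]
  | succ f ih =>
    intro l acc h
    cases l with
    | nil => simp [PySem.Chars.replace.go]
    | cons x t =>
      by_cases hx : x = c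
      · subst hx
        have hpre : List.isPrefixOf [x] (x :: t) = true := by
          simp [List.isPrefixOf]
        simp only [PySem.Chars.replace.go, hpre, if_pos, List.length_singleton,
          List.drop_succ_cons, List.drop_zero, List.reverse_singleton, List.singleton_append]
        rw [ih t (r :: acc) (by simpa using Nat.le_of_succ_le_succ h)]
        simp
      · have hpre : List.isPrefixOf [c] (x :: t) = false := by
          simp [List.isPrefixOf]
          intro hc; exact (hx hc.symm).elim
        simp only [PySem.Chars.replace.go, hpre]
        rw [if_neg (by simp)]
        rw [ih t (x :: acc) (by simpa using Nat.le_of_succ_le_succ h)]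
        simp [hx]

theorem replace_single (c r : Char) (l : List Char) :
    PySem.Chars.replace l [c] [r] = l.map (fun x => if x = c then r else x) := by
  simp only [PySem.Chars.replace, List.isEmpty]
  rw [replace_go_single c r l.length l [] (le_refl _)]
  simp

-- a fold of single-char replaces over cs is one pointwise map
theorem foldl_replace_eq_map (r : Char) :
    ∀ (cs l : List Char),
      cs.foldl (fun s ch => PySem.Chars.replace s [ch] [r]) l
        = l.map (fun x => if x ∈ cs then r else x) := by
  intro cs
  induction cs with
  | nil => intro l; simp
  | cons c cs ih =>
    intro l
    simp only [List.foldl_cons]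
    rw [replace_single, ih, List.map_map]
    apply List.map_congr_left
    intro x _
    by_cases hx : x = c
    · subst hx
      by_cases hr : r ∈ cs <;> simp [hr]
    · by_cases hm : x ∈ cs <;> simp [hx, hm]

-- the String-level fold bridges to the char-level fold
theorem toList_foldl_replace (rs : String) (r : Char) (hr : rs.toList = [r]) :
    ∀ (cs : List Char) (s : String),
      (cs.foldl (fun s ch => PySem.Str.replace s (String.ofList [ch]) rs) s).toList
        = cs.foldl (fun l ch => PySem.Chars.replace l [ch] [r]) s.toList := by
  intro cs
  induction cs with
  | nil => intro s; rfl
  | cons c cs ih =>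
    intro s
    simp only [List.foldl_cons]
    rw [ih, PySem.Str.toList_replace, hr]
    simp

-- 'single char in string' is list membership
theorem isIn_single_iff (c : Char) (l : List Char) :
    PySem.Chars.isIn [c] l = true ↔ c ∈ l := by
  rw [PySem.Chars.isIn_iff_infix]
  constructor
  · intro h
    exact List.singleton_sublist.mp (List.IsInfix.sublist h)
  · intro h
    obtain ⟨s, t, rfl⟩ := List.append_of_mem h
    exact ⟨s, t, by simp⟩

theorem isIn_single_eq (c : Char) (l : List Char) :
    PySem.Chars.isIn [c] l = decide (c ∈ l) := by
  by_cases h : c ∈ l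
  · simp [h, (isIn_single_iff c l).mpr h]
  · simp only [h, decide_false]
    cases hb : PySem.Chars.isIn [c] l
    · rfl
    · exact absurd ((isIn_single_iff c l).mp hb) h

-- the whole equality, on an arbitrary already-preprocessed string s1
theorem main_aux (s1 unwanted puncuation : String) :
    puncuation.toList.foldl (fun s ch => PySem.Str.replace s (String.ofList [ch]) ".")
      (unwanted.toList.foldl (fun s ch => PySem.Str.replace s (String.ofList [ch]) " ") s1)
    = String.ofList (s1.toList.map (pvClean unwanted puncuation)) := by
  apply String.ext
  rw [toList_foldl_replace "." '.' rfl, toList_foldl_replace " " ' ' rfl,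
      foldl_replace_eq_map, foldl_replace_eq_map, List.map_map]
  simp only [String.toList_ofList]
  apply List.map_congr_left
  intro x _
  simp only [Function.comp_apply, pvClean, PySem.Str.isIn, String.toList_ofList,
    isIn_single_eq]
  by_cases hu : x ∈ unwanted.toList <;>
    by_cases hp : x ∈ puncuation.toList <;>
      by_cases hs : ' ' ∈ puncuation.toList <;>
        simp [hu, hp, hs]

-- ===== VERDICT (by name: the statement is the Claim_ definition above) =====
theorem remove_unwanted_char_spec : Claim_equal_remove_unwanted_char := by
  intro text unwanted puncuation _
  exact main_aux (PySem.Str.replace (PySem.Str.replace (PySem.Str.lower text) "\n" " ") "- " " ")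
    unwanted puncuation
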